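-- pv_equiv track=rewrite | github.com/ai-kmu/etc | algorithm/2022/0524_1487_Making File Names Unique/Sangwon.py | getFolderNames
-- ===== SOURCE A (Python) =====
-- from typing import List
--
-- def getFolderNames(names: List[str]) -> List[str]:
--     used = {}
--     output = []
--     for i in names:
--         if i not in used:
--             used[i] = 1
--             output.append(i)
--         else:
--             k = used[i]
--             used[i] += 1
--             new = i + "(" + str(k) + ")"
--
--             # 이전 코드
--             '''while new in used:
--                 k += 1
--                 new = i + "(" + str(k) + ")"
--                 used[new] = 1
--                 output.append(new)'''
--
--             # 수정 코드
--             while new in used: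
--                 k += 1
--                 new = i + "(" + str(k) + ")"
--             used[new] = 1
--             output.append(new)
--
--     return(output)
-- ===== SOURCE B (Python) =====
-- from typing import List
--
-- def getFolderNames(names: List[str]) -> List[str]:
--     output = []
--     for name in names:
--         output.append(_resolve(name, output))
--     return output
--
-- def _resolve(name, prev):
--     # Stateless: the answer for `name` is fully determined by the list of names
--     # already assigned.  Probe suffixes from 1; this matches A's count-seeded probe
--     # because suffixes 1..count-1 of a base are always already assigned.
--     taken = set(prev)
--     if name not in taken:
--         return name
--     k = 1
--     while name + "(" + str(k) + ")" in taken: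
--         k += 1
--     return name + "(" + str(k) + ")"
-- ===== Notes on version B (the rewrite author's own statement) =====
-- stated objective: simpler
-- what changed: Drops A's occurrence-count dict and its count-seeded probe entirely: each name is resolved statelessly against the list of outputs already produced, always probing suffixes from 1 (correct because suffixes 1..count-1 of a base are provably always already assigned).
import Mathlib
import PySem

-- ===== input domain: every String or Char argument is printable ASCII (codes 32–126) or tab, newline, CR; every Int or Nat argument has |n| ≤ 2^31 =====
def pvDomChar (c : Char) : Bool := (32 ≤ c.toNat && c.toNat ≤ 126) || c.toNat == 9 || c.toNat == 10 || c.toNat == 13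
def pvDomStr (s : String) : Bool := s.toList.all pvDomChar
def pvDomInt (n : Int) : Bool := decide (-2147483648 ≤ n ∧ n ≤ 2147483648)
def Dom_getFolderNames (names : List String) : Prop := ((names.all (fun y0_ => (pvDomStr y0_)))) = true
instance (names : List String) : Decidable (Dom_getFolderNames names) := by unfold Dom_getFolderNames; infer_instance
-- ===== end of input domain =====

-- B drops A's occurrence-count dict and its count-seeded probe: each name is resolved
-- statelessly against the list of outputs already produced, probing suffixes from 1.

-- ===== PORT A =====
-- A's `while new in used: k += 1; new = i + "(" + str(k) + ")"` ported with fuel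
-- used.size + 1: the candidate suffixes are pairwise distinct strings, so a free one is
-- found within that many steps — the fuel only makes the same computation total.
def pvScanA (used : PySem.Dict String Int) (i : String) : Int → Nat → Int
  | k, 0 => k
  | k, f + 1 =>
    if used.contains (i ++ "(" ++ PySem.Int.toStr k ++ ")") then pvScanA used i (k + 1) f else k

def pvGoA : List String → PySem.Dict String Int → List String → List String
  | [], _, output => output
  | i :: rest, used, output =>
    if !(used.contains i) then
      pvGoA rest (used.insert i 1) (output ++ [i])
    else
      let k := (used.get? i).getD 0            -- used[i]; the key is present in this branch
      let used1 := used.insert i (k + 1)       -- used[i] += 1 (overwrite keeps position)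
      let kf := pvScanA used1 i k (used1.size + 1)
      let nw := i ++ "(" ++ PySem.Int.toStr kf ++ ")"
      pvGoA rest (used1.insert nw 1) (output ++ [nw])

def getFolderNames (names : List String) : List String :=
  pvGoA names PySem.Dict.empty []

-- ===== PORT B =====
-- B's `while name + "(" + str(k) + ")" in taken: k += 1` ported with fuel |taken| + 1
-- (same remark: distinct candidates, so the fuel only makes the computation total).
def pvScanB (taken : PySem.Set String) (name : String) : Int → Nat → Int
  | k, 0 => k
  | k, f + 1 =>
    if PySem.Set.contains taken (name ++ "(" ++ PySem.Int.toStr k ++ ")") then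
      pvScanB taken name (k + 1) f
    else k

def pvResolve (name : String) (prev : List String) : String :=
  let taken := PySem.Set.ofList prev
  if PySem.Set.contains taken name then
    let k := pvScanB taken name 1 (taken.length + 1)
    name ++ "(" ++ PySem.Int.toStr k ++ ")"
  else name

def getFolderNames_alt (names : List String) : List String :=
  names.foldl (fun output name => output ++ [pvResolve name output]) []

-- ===== PRECONDITION & SPEC =====
def Spec_getFolderNames (names : List String) (out : List String) : Prop := out = getFolderNames_alt names
instance (names : List String) (out : List String) : Decidable (Spec_getFolderNames names out) := by unfold Spec_getFolderNames; infer_instance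

-- ===== CLAIM (what is proved, stated in full; the proofs are below) =====
def Claim_equal_getFolderNames : Prop := ∀ (names : List String), Dom_getFolderNames names → Spec_getFolderNames names (getFolderNames names)

-- ===== LEMMAS AND PROOFS =====

def pvRep (n : Nat) : List Char :=
  if _h : n < 10 then [Nat.digitChar n]
  else pvRep (n / 10) ++ [Nat.digitChar (n % 10)]
decreasing_by exact Nat.div_lt_self (by omega) (by omega)

theorem pvRep_eq (n : Nat) :
    pvRep n = (if n < 10 then [] else pvRep (n / 10)) ++ [Nat.digitChar (n % 10)] := by
  rw [pvRep]
  split_ifs with h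
  · simp [Nat.mod_eq_of_lt h]
  · rfl

theorem pvRep_ne_nil (n : Nat) : pvRep n ≠ [] := by
  rw [pvRep]; split_ifs <;> simp

theorem pvToDigitsCore_eq (f : Nat) : ∀ (n : Nat) (ds : List Char), n < f →
    Nat.toDigitsCore 10 f n ds = pvRep n ++ ds := by
  induction f with
  | zero => omega
  | succ f ih =>
    intro n ds h
    simp only [Nat.toDigitsCore]
    by_cases h0 : n / 10 = 0
    · have h10 : n < 10 := by omega
      simp [h0, pvRep, h10, Nat.mod_eq_of_lt h10]
    · have h10 : ¬ n < 10 := by omega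
      have hlt : n / 10 < f := by
        have := Nat.div_lt_self (by omega : 0 < n) (by omega : 1 < 10)
        omega
      simp only [h0, if_false]
      rw [ih (n / 10) _ hlt]
      conv_rhs => rw [pvRep_eq n]
      simp [h10]

theorem pvDigitChar_inj {a b : Nat} (ha : a < 10) (hb : b < 10)
    (h : Nat.digitChar a = Nat.digitChar b) : a = b := by
  have key : ∀ x y : Fin 10, Nat.digitChar x = Nat.digitChar y → x = y := by decide
  have := key ⟨a, ha⟩ ⟨b, hb⟩ h
  simpa [Fin.ext_iff] using this

theorem pvRep_inj : ∀ {m n : Nat}, pvRep m = pvRep n → m = n := by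
  intro m
  induction m using Nat.strong_induction_on with
  | _ m ih =>
    intro n h
    rw [pvRep_eq m, pvRep_eq n] at h
    rw [← List.concat_eq_append, ← List.concat_eq_append] at h
    have h2 := List.concat_inj.mp h
    obtain ⟨hpre, hd⟩ := h2
    by_cases hm : m < 10 <;> by_cases hn : n < 10
    · have := pvDigitChar_inj (Nat.mod_lt _ (by omega)) (Nat.mod_lt _ (by omega)) hd
      omega
    · simp [hm, hn] at hpre
      exact absurd hpre (pvRep_ne_nil _)
    · simp [hm, hn] at hpre
      exact absurd hpre (pvRep_ne_nil _)
    · simp [hm, hn] at hpre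
      have h1 : m / 10 = n / 10 := ih (m / 10) (Nat.div_lt_self (by omega) (by omega)) hpre
      have h2 : m % 10 = n % 10 :=
        pvDigitChar_inj (Nat.mod_lt _ (by omega)) (Nat.mod_lt _ (by omega)) hd
      omega

theorem pvToChars_inj {a b : Int} (ha : 0 ≤ a) (hb : 0 ≤ b)
    (h : PySem.Int.toChars a = PySem.Int.toChars b) : a = b := by
  unfold PySem.Int.toChars at h
  rw [if_neg (by omega), if_neg (by omega)] at h
  unfold Nat.toDigits at h
  rw [pvToDigitsCore_eq _ _ _ (by omega), pvToDigitsCore_eq _ _ _ (by omega)] at h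
  simp at h
  have := pvRep_inj h
  omega

def pvCand (i : String) (k : Int) : String := i ++ "(" ++ PySem.Int.toStr k ++ ")"

theorem pvCand_inj {i : String} {a b : Int} (ha : 0 ≤ a) (hb : 0 ≤ b)
    (h : pvCand i a = pvCand i b) : a = b := by
  apply pvToChars_inj ha hb
  have h' := congrArg String.toList h
  simp [pvCand, PySem.Int.toList_toStr] at h'
  exact h'

theorem pvNodupSubsetLen (l S : List String) (h1 : l.Nodup) (h2 : ∀ x ∈ l, x ∈ S) :
    l.length ≤ S.length := by
  have hc1 : l.toFinset.card = l.length := List.toFinset_card_of_nodup h1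
  have hsub : l.toFinset ⊆ S.toFinset := by
    intro x hx
    rw [List.mem_toFinset] at hx ⊢
    exact h2 x hx
  have := Finset.card_le_card hsub
  have := S.toFinset_card_le
  omega

theorem pvScanA_eq_scanB (d : PySem.Dict String Int) (i : String) :
    ∀ (f : Nat) (k : Int), pvScanA d i k f = pvScanB d.keys i k f := by
  intro f
  induction f with
  | zero => intro k; rfl
  | succ f ih =>
    intro k
    have hc : d.contains (i ++ "(" ++ PySem.Int.toStr k ++ ")")
        = PySem.Set.contains d.keys (i ++ "(" ++ PySem.Int.toStr k ++ ")") := by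
      by_cases hm : (i ++ "(" ++ PySem.Int.toStr k ++ ")") ∈ d.keys
      · rw [(PySem.Dict.contains_iff_mem_keys _ _).mpr hm, (PySem.Set.contains_iff _ _).mpr hm]
      · rw [Bool.eq_iff_iff]
        simp [PySem.Dict.contains_iff_mem_keys, hm]
    simp only [pvScanA, pvScanB, hc]
    split_ifs with _h
    · exact ih (k + 1)
    · rfl

theorem pvScanB_least (S : PySem.Set String) (i : String) :
    ∀ (f : Nat) (k r : Int), k ≤ r → r < k + f →
    pvCand i r ∉ S → (∀ j : Int, k ≤ j → j < r → pvCand i j ∈ S) →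
    pvScanB S i k f = r := by
  intro f
  induction f with
  | zero => intro k r h1 h2 _ _; omega
  | succ f ih =>
    intro k r h1 h2 hfree hocc
    by_cases hk : k = r
    · subst hk
      have : PySem.Set.contains S (i ++ "(" ++ PySem.Int.toStr k ++ ")") = false := by
        simp only [Bool.eq_false_iff]
        intro hco
        exact hfree ((PySem.Set.contains_iff _ _).mp hco)
      simp only [pvScanB, this, Bool.false_eq_true, if_false]
    · have hk' : k < r := by omega
      have : PySem.Set.contains S (i ++ "(" ++ PySem.Int.toStr k ++ ")") = true :=
        (PySem.Set.contains_iff _ _).mpr (hocc k le_rfl hk')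
      simp only [pvScanB, this, if_true]
      exact ih (k + 1) r (by omega) (by omega) hfree (fun j hj1 hj2 => hocc j (by omega) hj2)

theorem pvExistsLeastFree (S : List String) (i : String) (k : Int) (hk : 0 ≤ k) :
    ∃ r : Int, k ≤ r ∧ r ≤ k + S.length ∧ pvCand i r ∉ S ∧
      (∀ j : Int, k ≤ j → j < r → pvCand i j ∈ S) := by
  have hex2 : ∃ t : Nat, t ≤ S.length ∧ pvCand i (k + t) ∉ S := by
    by_contra hall
    push Not at hall
    have hsub : ∀ x ∈ (List.range (S.length + 1)).map (fun t : Nat => pvCand i (k + (t : Int))), x ∈ S := by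
      intro x hx
      rw [List.mem_map] at hx
      obtain ⟨t, ht, rfl⟩ := hx
      exact hall t (by rw [List.mem_range] at ht; omega)
    have hnd : ((List.range (S.length + 1)).map (fun t : Nat => pvCand i (k + (t : Int)))).Nodup := by
      refine List.Nodup.map_on ?_ (List.nodup_range)
      intro a _ b _ hab
      have := pvCand_inj (i := i) (a := k + (a : Int)) (b := k + (b : Int)) (by omega) (by omega) hab
      omega
    have := pvNodupSubsetLen _ S hnd hsub
    simp at this
  classical
  have hex : ∃ t : Nat, pvCand i (k + t) ∉ S := ⟨hex2.choose, hex2.choose_spec.2⟩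
  refine ⟨k + Nat.find hex, by omega, ?_, Nat.find_spec hex, ?_⟩
  · have h1 : Nat.find hex ≤ hex2.choose := Nat.find_min' hex hex2.choose_spec.2
    have h2 : hex2.choose ≤ S.length := hex2.choose_spec.1
    omega
  · intro j hj1 hj2
    have htj : ((j - k).toNat) < Nat.find hex := by omega
    have := Nat.find_min hex htj
    simp only [not_not] at this
    have hjk : k + ((j - k).toNat : Int) = j := by omega
    rwa [hjk] at this

-- the loop invariant of A's dict: every stored count v is ≥ 1 and all suffixes 1..v-1
-- of that base are already handed out (are keys of the dict = outputs so far)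
def pvInv (d : PySem.Dict String Int) : Prop :=
  ∀ x v, d.get? x = some v → 1 ≤ v ∧
    ∀ j : Int, 1 ≤ j → j < v → pvCand x j ∈ d.keys

theorem pvMain : ∀ (names : List String) (d : PySem.Dict String Int) (out : List String),
    d.keys.Nodup → pvInv d → out = d.keys →
    pvGoA names d out = names.foldl (fun output name => output ++ [pvResolve name output]) out := by
  intro names
  induction names with
  | nil => intro d out _ _ _; rfl
  | cons i rest ih =>
    intro d out hnd hinv hout
    subst hout
    by_cases hmem : i ∈ d.keys
    · -- duplicate branch
      have hca : d.contains i = true := (PySem.Dict.contains_iff_mem_keys _ _).mpr hmem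
      have hofl : PySem.Set.ofList d.keys = d.keys := PySem.Set.ofList_eq_self_of_nodup _ hnd
      have hcb : PySem.Set.contains (PySem.Set.ofList d.keys) i = true := by
        rw [hofl]; exact (PySem.Set.contains_iff _ _).mpr hmem
      obtain ⟨k, hk⟩ : ∃ k, d.get? i = some k := by
        cases h : d.get? i with
        | none =>
          exact absurd ((PySem.Dict.get?_eq_none_iff_not_mem_keys _ _).mp h) (by simp [hmem])
        | some k => exact ⟨k, rfl⟩
      obtain ⟨hk1, hocc0⟩ := hinv i k hk
      -- r = the least free suffix ≥ 1
      obtain ⟨r, hr1, hr2, hrfree, hrocc⟩ := pvExistsLeastFree d.keys i 1 (by omega)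
      -- r ≥ k because suffixes 1..k-1 are all taken while r is free
      have hrk : k ≤ r := by
        by_contra hlt
        push Not at hlt
        exact hrfree (hocc0 r (by omega) hlt)
      have hkeys1 : (d.insert i (k + 1)).keys = d.keys :=
        PySem.Dict.keys_insert_of_contains _ _ hca
      have hsz : (d.insert i (k + 1)).size = d.keys.length := by
        have h2 : (d.insert i (k + 1)).size = (d.insert i (k + 1)).keys.length := by
          simp [PySem.Dict.size, PySem.Dict.keys]
        rw [h2, hkeys1]
      -- A's scan, seeded at the count k, lands on r
      have hscanA : pvScanA (d.insert i (k + 1)) i k ((d.insert i (k + 1)).size + 1) = r := by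
        rw [pvScanA_eq_scanB, hkeys1, hsz]
        exact pvScanB_least _ _ _ _ _ hrk (by omega) hrfree
          (fun j hj1 hj2 => hrocc j (by omega) hj2)
      -- B's scan, seeded at 1, lands on r too
      have hscanB : pvScanB (PySem.Set.ofList d.keys) i 1 ((PySem.Set.ofList d.keys).length + 1) = r := by
        rw [hofl]
        exact pvScanB_least _ _ _ _ _ hr1 (by omega) hrfree hrocc
      have hnwfree : (i ++ "(" ++ PySem.Int.toStr r ++ ")") ∉ d.keys := hrfree
      have hcnw : (d.insert i (k + 1)).contains (i ++ "(" ++ PySem.Int.toStr r ++ ")") = false := by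
        rw [← Bool.not_eq_true, PySem.Dict.contains_iff_mem_keys, hkeys1]
        exact hrfree
      have hres : pvResolve i d.keys = i ++ "(" ++ PySem.Int.toStr r ++ ")" := by
        simp only [pvResolve, hcb, if_true, hscanB]
      simp only [pvGoA, List.foldl_cons, hca, Bool.not_true, Bool.false_eq_true, if_false, hk,
        Option.getD_some, hscanA, hres]
      have hkeys2 : ((d.insert i (k + 1)).insert (i ++ "(" ++ PySem.Int.toStr r ++ ")") 1).keys
          = d.keys ++ [i ++ "(" ++ PySem.Int.toStr r ++ ")"] := by
        rw [PySem.Dict.keys_insert_of_not_contains _ _ hcnw, hkeys1]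
      rw [ih _ _ ?_ ?_ hkeys2.symm]
      · rw [hkeys2]
        exact hnd.append (List.nodup_singleton _)
          (fun a ha hb => hnwfree ((List.mem_singleton.mp hb) ▸ ha))
      · intro x v hx
        rw [PySem.Dict.get?_insert] at hx
        by_cases hxnw : x = (i ++ "(" ++ PySem.Int.toStr r ++ ")")
        · rw [if_pos hxnw] at hx
          obtain rfl : (1 : Int) = v := by injection hx
          exact ⟨le_rfl, fun j h1 h2 => by omega⟩
        · rw [if_neg hxnw, PySem.Dict.get?_insert] at hx
          by_cases hxi : x = i
          · subst hxi
            rw [if_pos rfl] at hx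
            obtain rfl : k + 1 = v := by injection hx
            refine ⟨by omega, ?_⟩
            intro j h1 h2
            rw [hkeys2]
            by_cases hjk : j < k
            · exact List.mem_append_left _ (hocc0 j h1 hjk)
            · -- j = k: either k < r (then k is taken already) or k = r (the new name)
              have hj : j = k := by omega
              subst hj
              by_cases hjr : j < r
              · exact List.mem_append_left _ (hrocc j (by omega) hjr)
              · have : j = r := by omega
                subst this
                exact List.mem_append_right _ (by simp [pvCand])
          · rw [if_neg hxi] at hx
            obtain ⟨h1, h3⟩ := hinv x v hx
            exact ⟨h1, fun j hj1 hj2 => by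
              rw [hkeys2]; exact List.mem_append_left _ (h3 j hj1 hj2)⟩
    · -- fresh branch
      have hca : d.contains i = false := by
        rw [← Bool.not_eq_true, PySem.Dict.contains_iff_mem_keys]; exact hmem
      have hofl : PySem.Set.ofList d.keys = d.keys := PySem.Set.ofList_eq_self_of_nodup _ hnd
      have hcb : PySem.Set.contains (PySem.Set.ofList d.keys) i = false := by
        rw [hofl, ← Bool.not_eq_true, PySem.Set.contains_iff]; exact hmem
      have hkeys : (d.insert i 1).keys = d.keys ++ [i] := by
        rw [PySem.Dict.keys_insert_of_not_contains _ _ hca]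
      have hres : pvResolve i d.keys = i := by
        simp only [pvResolve, hcb, Bool.false_eq_true, if_false]
      simp only [pvGoA, List.foldl_cons, hca, Bool.not_false, if_true, hres]
      rw [ih _ _ ?_ ?_ hkeys.symm]
      · rw [hkeys]
        exact hnd.append (List.nodup_singleton _)
          (fun a ha hb => hmem ((List.mem_singleton.mp hb) ▸ ha))
      · intro x v hx
        rw [PySem.Dict.get?_insert] at hx
        by_cases hxi : x = i
        · rw [if_pos hxi] at hx
          obtain rfl : (1 : Int) = v := by injection hx
          exact ⟨le_rfl, fun j h1 h2 => by omega⟩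
        · rw [if_neg hxi] at hx
          obtain ⟨h1, h3⟩ := hinv x v hx
          exact ⟨h1, fun j hj1 hj2 => by
            rw [hkeys]; exact List.mem_append_left _ (h3 j hj1 hj2)⟩

-- ===== VERDICT (by name: the statement is the Claim_ definition above) =====
theorem getFolderNames_spec : Claim_equal_getFolderNames := by
  intro names _
  unfold Spec_getFolderNames getFolderNames getFolderNames_alt
  exact pvMain names PySem.Dict.empty []
    (by simp [PySem.Dict.keys_empty])
    (by intro x v hx; rw [PySem.Dict.get?_empty] at hx; cases hx)
    (by rw [PySem.Dict.keys_empty])
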